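-- pv_equiv track=rewrite | github.com/anVSS1/PeerNet | data_collection/pdf_parser.py | _build_full_text
-- ===== SOURCE A (Python) =====
-- from typing import Dict, Optional, List
--
-- def _build_full_text(sections: Dict) -> str:
--     """Build full text from sections."""
--     parts = []
--     section_order = ['abstract', 'introduction', 'background', 'related_work',
--                     'methods', 'methodology', 'experiments', 'results',
--                     'discussion', 'conclusion', 'references']
--
--     for section in section_order:
--         if section in sections and sections[section]:
--             parts.append(f"\n\n## {section.upper()}\n\n{sections[section]}")
--
--     # Add any sections not in standard order
--     for section, content in sections.items():
--         if section not in section_order and content: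
--             parts.append(f"\n\n## {section.upper()}\n\n{content}")
--
--     return ''.join(parts).strip()
-- ===== SOURCE B (Python) =====
-- def _build_full_text(sections):
--     """Build full text from sections."""
--     section_order = ['abstract', 'introduction', 'background', 'related_work',
--                      'methods', 'methodology', 'experiments', 'results',
--                      'discussion', 'conclusion', 'references']
--     rank = {name: i for i, name in enumerate(section_order)}
--     parts = [f"\n\n## {k.upper()}\n\n{sections[k]}"
--              for k in sorted(sections, key=lambda k: rank.get(k, len(section_order)))
--              if sections[k]]
--     return ''.join(parts).strip()
-- ===== Notes on version B (the rewrite author's own statement) =====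
-- stated objective: simpler
-- what changed: A's two sequential scans (fixed section_order lookup loop, then a leftover-sections loop) are replaced by building a rank dict once and doing a single stable sort of the keys followed by one filtered pass.
import Mathlib
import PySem

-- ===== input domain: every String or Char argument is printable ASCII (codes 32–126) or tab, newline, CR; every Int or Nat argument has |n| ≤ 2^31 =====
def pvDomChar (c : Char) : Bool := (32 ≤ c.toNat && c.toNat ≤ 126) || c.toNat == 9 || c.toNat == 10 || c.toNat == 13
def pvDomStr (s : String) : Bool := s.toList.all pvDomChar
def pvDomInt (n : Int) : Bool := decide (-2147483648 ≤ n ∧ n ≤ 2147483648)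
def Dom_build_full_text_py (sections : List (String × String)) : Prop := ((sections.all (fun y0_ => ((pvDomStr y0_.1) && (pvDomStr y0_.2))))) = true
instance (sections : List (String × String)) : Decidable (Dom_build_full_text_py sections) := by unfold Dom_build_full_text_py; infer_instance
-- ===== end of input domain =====

-- B replaces A's two sequential scans (standard sections by a fixed order list, then leftover
-- sections) by one stable sort of the keys under a rank dictionary followed by a single pass
-- (objective: simpler decomposition; same asymptotic cost).

-- ===== PORT A =====
def pvSectionOrder : List String :=
  ["abstract", "introduction", "background", "related_work",
   "methods", "methodology", "experiments", "results",
   "discussion", "conclusion", "references"]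

-- f"\n\n## {k.upper()}\n\n{v}"
def pvFmt (k v : String) : String := "\n\n## " ++ PySem.Str.upper k ++ "\n\n" ++ v

def build_full_text_py (sections : List (String × String)) : String :=
  let d : PySem.Dict String String := PySem.Dict.mk sections
  -- for section in section_order: if section in sections and sections[section]: parts.append(…)
  let parts : List String :=
    pvSectionOrder.foldl
      (fun parts s =>
        if d.contains s && decide (d.getD s "" ≠ "") then
          parts ++ [pvFmt s (d.getD s "")]
        else parts) []
  -- for section, content in sections.items(): if section not in section_order and content: parts.append(…)
  let parts2 : List String :=
    sections.foldl
      (fun parts kv =>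
        if !pvSectionOrder.contains kv.1 && decide (kv.2 ≠ "") then
          parts ++ [pvFmt kv.1 kv.2]
        else parts) parts
  PySem.Str.strip (PySem.Str.join "" parts2)

-- ===== PORT B =====
-- rank = {name: i for i, name in enumerate(section_order)}
def pvRank : PySem.Dict String Int :=
  (PySem.List.enumerate pvSectionOrder 0).foldl (fun d p => d.insert p.2 p.1) PySem.Dict.empty

-- lambda k: rank.get(k, len(section_order))
def pvOrderKey (k : String) : Int := pvRank.getD k (PySem.List.len pvSectionOrder)

def build_full_text_py_alt (sections : List (String × String)) : String :=
  let d : PySem.Dict String String := PySem.Dict.mk sections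
  -- sorted(sections, key=lambda k: rank.get(k, len(section_order)))
  let ordered : List String := PySem.List.sorted (sections.map Prod.fst) pvOrderKey
  -- [f"\n\n## {k.upper()}\n\n{sections[k]}" for k in ordered if sections[k]]
  let parts : List String :=
    (ordered.filter (fun k => decide (d.getD k "" ≠ ""))).map (fun k => pvFmt k (d.getD k ""))
  PySem.Str.strip (PySem.Str.join "" parts)

-- ===== PRECONDITION & SPEC =====
-- Pre_ excludes association lists with duplicate keys: a Python dict cannot contain them, and on
-- such lists the two ports' accidental behaviours (per-pair emission vs first-match lookup) differ.
def Pre_build_full_text_py (sections : List (String × String)) : Prop :=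
  (sections.map Prod.fst).Nodup
instance (sections : List (String × String)) : Decidable (Pre_build_full_text_py sections) := by
  unfold Pre_build_full_text_py; infer_instance

def pvWitness_build_full_text_py : (List (String × String)) :=
  [("introduction", "We study."), ("appendix", "Extra.")]

def Spec_build_full_text_py (sections : List (String × String)) (out : String) : Prop :=
  out = build_full_text_py_alt sections
instance (sections : List (String × String)) (out : String) : Decidable (Spec_build_full_text_py sections out) := by
  unfold Spec_build_full_text_py; infer_instance

-- ===== CLAIM (what is proved, stated in full; the proofs are below) =====
def Claim_equal_build_full_text_py : Prop :=
  ∀ (sections : List (String × String)), Dom_build_full_text_py sections →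
    Pre_build_full_text_py sections →
    Spec_build_full_text_py sections (build_full_text_py sections)

-- ===== LEMMAS AND PROOFS =====
def pvKnown (ks : List String) : List String := pvSectionOrder.filter (fun s => ks.contains s)
def pvUnknown (ks : List String) : List String := ks.filter (fun k => !pvSectionOrder.contains k)

lemma pv_key_unknown (y : String) (h : pvSectionOrder.contains y = false) : pvOrderKey y = 11 := by
  simp [pvSectionOrder] at h
  obtain ⟨h1,h2,h3,h4,h5,h6,h7,h8,h9,h10,h11⟩ := h
  simp [pvOrderKey, pvRank, pvSectionOrder, PySem.List.enumerate, List.foldl,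
    PySem.Dict.getD_insert, h1,h2,h3,h4,h5,h6,h7,h8,h9,h10,h11]

lemma pv_key_le (y : String) : pvOrderKey y ≤ 11 := by
  by_cases h : pvSectionOrder.contains y = true
  · have hy : y ∈ pvSectionOrder := by simpa using h
    simp [pvSectionOrder] at hy
    rcases hy with rfl|rfl|rfl|rfl|rfl|rfl|rfl|rfl|rfl|rfl|rfl <;> decide
  · rw [pv_key_unknown y (by simpa using h)]

lemma pv_contains_eq (sections : List (String × String)) (s : String) :
    (PySem.Dict.mk sections).contains s = (sections.map Prod.fst).contains s := by
  rw [PySem.Dict.contains_mk]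
  apply Bool.eq_iff_iff.mpr
  simp [List.mem_map]

lemma pv_insertBy_append (p : String → String → Bool) (x : String) (A B : List String)
    (hB : ∀ y ∈ B, p x y = true) :
    PySem.List.insertBy p x (A ++ B) = PySem.List.insertBy p x A ++ B := by
  induction A with
  | nil =>
    cases B with
    | nil => simp [PySem.List.insertBy]
    | cons b B' => simp [PySem.List.insertBy, hB b (by simp)]
  | cons a A' ih =>
    by_cases h : p x a = true
    · simp [PySem.List.insertBy, h]
    · simp only [List.cons_append]
      simp [PySem.List.insertBy, h, ih]

lemma pv_insert_known (ks : List String) (x : String) (P₁ P₂ : List String)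
    (hdec : pvSectionOrder = P₁ ++ x :: P₂)
    (h1 : ∀ y ∈ P₁, decide (pvOrderKey x < pvOrderKey y) = false)
    (h2 : ∀ y ∈ P₂, decide (pvOrderKey x < pvOrderKey y) = true)
    (hx11 : pvOrderKey x < 11)
    (hxks : x ∉ ks) :
    PySem.List.insertBy (fun a b => decide (pvOrderKey a < pvOrderKey b)) x
        (pvKnown ks ++ pvUnknown ks)
      = pvKnown (ks ++ [x]) ++ pvUnknown (ks ++ [x]) := by
  have hnd : pvSectionOrder.Nodup := by decide
  rw [hdec] at hnd
  rw [List.nodup_middle] at hnd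
  have hxP : x ∉ P₁ ++ P₂ := (List.nodup_cons.mp hnd).1
  have hxP1 : x ∉ P₁ := fun h => hxP (List.mem_append.mpr (Or.inl h))
  have hxP2 : x ∉ P₂ := fun h => hxP (List.mem_append.mpr (Or.inr h))
  have hxSO : x ∈ pvSectionOrder := by rw [hdec]; simp
  -- pvKnown ks with the decomposition
  have hK : pvKnown ks = P₁.filter (fun s => ks.contains s) ++ P₂.filter (fun s => ks.contains s) := by
    unfold pvKnown
    rw [hdec, List.filter_append, List.filter_cons]
    simp [hxks]
  have hcx : (ks ++ [x]).contains x = true := by simp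
  have hcongr : ∀ y, y ≠ x → (ks ++ [x]).contains y = ks.contains y := by
    intro y hy
    apply Bool.eq_iff_iff.mpr
    simp [hy]
  -- RHS known part
  have hK' : pvKnown (ks ++ [x])
      = P₁.filter (fun s => ks.contains s) ++ x :: P₂.filter (fun s => ks.contains s) := by
    unfold pvKnown
    rw [hdec, List.filter_append, List.filter_cons]
    simp only [hcx, if_true]
    have e1 : List.filter (fun s => (ks ++ [x]).contains s) P₁
        = List.filter (fun s => ks.contains s) P₁ :=
      List.filter_congr (fun y hyP => hcongr y (fun h => hxP1 (h ▸ hyP)))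
    have e2 : List.filter (fun s => (ks ++ [x]).contains s) P₂
        = List.filter (fun s => ks.contains s) P₂ :=
      List.filter_congr (fun y hyP => hcongr y (fun h => hxP2 (h ▸ hyP)))
    rw [e1, e2]
  -- RHS unknown part
  have hU : pvUnknown (ks ++ [x]) = pvUnknown ks := by
    unfold pvUnknown
    rw [List.filter_append, List.filter_cons]
    simp [hxSO]
  rw [hK, hK', hU, List.append_assoc]
  rw [pv_insertBy_append _ _ _ _ ?hB]
  case hB =>
    intro y hy
    rcases List.mem_append.mp hy with hy | hy
    · exact h2 y (List.mem_of_mem_filter hy)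
    · have : pvOrderKey y = 11 := pv_key_unknown y (by
        have := List.of_mem_filter hy
        simpa using this)
      simp [this]; omega
  rw [PySem.List.insertBy_of_forall_not_before _ _ _ ?hA]
  case hA =>
    intro y hy
    exact h1 y (List.mem_of_mem_filter hy)
  simp

lemma pv_sorted_char (ks : List String) (h : ks.Nodup) :
    PySem.List.sorted ks pvOrderKey = pvKnown ks ++ pvUnknown ks := by
  induction ks using List.reverseRecOn with
  | nil => simp [PySem.List.sorted_eq_foldl_insertBy, pvKnown, pvUnknown]
  | append_singleton ks x ih =>
    rw [List.nodup_append] at h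
    obtain ⟨hks, -, hdisj⟩ := h
    have hxks : x ∉ ks := fun hm => hdisj x hm x (by simp) rfl
    have hstep : PySem.List.sorted (ks ++ [x]) pvOrderKey
        = PySem.List.insertBy (fun a b => decide (pvOrderKey a < pvOrderKey b)) x
            (PySem.List.sorted ks pvOrderKey) := by
      rw [PySem.List.sorted_eq_foldl_insertBy, PySem.List.sorted_eq_foldl_insertBy,
        List.foldl_append, List.foldl_cons, List.foldl_nil]
    rw [hstep, ih hks]
    by_cases hx : pvSectionOrder.contains x = true
    · have hmem : x ∈ pvSectionOrder := by simpa using hx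
      simp only [pvSectionOrder, List.mem_cons, List.not_mem_nil, or_false] at hmem
      rcases hmem with rfl|rfl|rfl|rfl|rfl|rfl|rfl|rfl|rfl|rfl|rfl
      · exact pv_insert_known ks _ []
          ["introduction","background","related_work","methods","methodology","experiments","results","discussion","conclusion","references"]
          rfl (by decide) (by decide) (by decide) hxks
      · exact pv_insert_known ks _ ["abstract"]
          ["background","related_work","methods","methodology","experiments","results","discussion","conclusion","references"]
          rfl (by decide) (by decide) (by decide) hxks
      · exact pv_insert_known ks _ ["abstract","introduction"]
          ["related_work","methods","methodology","experiments","results","discussion","conclusion","references"]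
          rfl (by decide) (by decide) (by decide) hxks
      · exact pv_insert_known ks _ ["abstract","introduction","background"]
          ["methods","methodology","experiments","results","discussion","conclusion","references"]
          rfl (by decide) (by decide) (by decide) hxks
      · exact pv_insert_known ks _ ["abstract","introduction","background","related_work"]
          ["methodology","experiments","results","discussion","conclusion","references"]
          rfl (by decide) (by decide) (by decide) hxks
      · exact pv_insert_known ks _ ["abstract","introduction","background","related_work","methods"]
          ["experiments","results","discussion","conclusion","references"]
          rfl (by decide) (by decide) (by decide) hxks
      · exact pv_insert_known ks _ ["abstract","introduction","background","related_work","methods","methodology"]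
          ["results","discussion","conclusion","references"]
          rfl (by decide) (by decide) (by decide) hxks
      · exact pv_insert_known ks _ ["abstract","introduction","background","related_work","methods","methodology","experiments"]
          ["discussion","conclusion","references"]
          rfl (by decide) (by decide) (by decide) hxks
      · exact pv_insert_known ks _ ["abstract","introduction","background","related_work","methods","methodology","experiments","results"]
          ["conclusion","references"]
          rfl (by decide) (by decide) (by decide) hxks
      · exact pv_insert_known ks _ ["abstract","introduction","background","related_work","methods","methodology","experiments","results","discussion"]
          ["references"]
          rfl (by decide) (by decide) (by decide) hxks
      · exact pv_insert_known ks _ ["abstract","introduction","background","related_work","methods","methodology","experiments","results","discussion","conclusion"]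
          []
          rfl (by decide) (by decide) (by decide) hxks
    · have hx' : pvSectionOrder.contains x = false := by simpa using hx
      have hk11 : pvOrderKey x = 11 := pv_key_unknown x hx'
      have hxSO : x ∉ pvSectionOrder := by simpa using hx
      rw [PySem.List.insertBy_of_forall_not_before _ _ _ ?hall]
      case hall =>
        intro y hy
        have := pv_key_le y
        simp [hk11]
        omega
      have hK : pvKnown (ks ++ [x]) = pvKnown ks := by
        unfold pvKnown
        apply List.filter_congr
        intro y hy
        apply Bool.eq_iff_iff.mpr
        have : y ≠ x := fun h => hxSO (h ▸ hy)
        simp [this]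
      have hU : pvUnknown (ks ++ [x]) = pvUnknown ks ++ [x] := by
        unfold pvUnknown
        rw [List.filter_append, List.filter_cons]
        simp [hxSO]
      rw [hK, hU, List.append_assoc]

lemma pv_getD_ne_contains (sections : List (String × String)) (s : String)
    (h : (PySem.Dict.mk sections).getD s "" ≠ "") :
    (PySem.Dict.mk sections).contains s = true := by
  rcases hb : (PySem.Dict.mk sections).contains s with _ | _
  · exact absurd (PySem.Dict.getD_of_not_contains _ _ hb) h
  · rfl

lemma pv_part1 (sections : List (String × String)) :
    ((pvKnown (sections.map Prod.fst)).filter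
        (fun k => decide ((PySem.Dict.mk sections).getD k "" ≠ ""))).map
        (fun k => pvFmt k ((PySem.Dict.mk sections).getD k ""))
    = (pvSectionOrder.filter
        (fun s => (PySem.Dict.mk sections).contains s
            && decide ((PySem.Dict.mk sections).getD s "" ≠ ""))).map
        (fun s => pvFmt s ((PySem.Dict.mk sections).getD s "")) := by
  unfold pvKnown
  rw [List.filter_filter]
  congr 1
  apply List.filter_congr
  intro s _
  apply Bool.eq_iff_iff.mpr
  simp only [Bool.and_eq_true, decide_eq_true_eq]
  constructor
  · rintro ⟨hg, -⟩
    exact ⟨pv_getD_ne_contains sections s hg, hg⟩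
  · rintro ⟨hc, hg⟩
    refine ⟨hg, ?_⟩
    rw [← pv_contains_eq]
    exact hc

lemma pv_part2 (sections : List (String × String)) (h : (sections.map Prod.fst).Nodup) :
    ((pvUnknown (sections.map Prod.fst)).filter
        (fun k => decide ((PySem.Dict.mk sections).getD k "" ≠ ""))).map
        (fun k => pvFmt k ((PySem.Dict.mk sections).getD k ""))
    = (sections.filter
        (fun kv => !pvSectionOrder.contains kv.1 && decide (kv.2 ≠ ""))).map
        (fun kv => pvFmt kv.1 kv.2) := by
  have hval : ∀ kv ∈ sections, (PySem.Dict.mk sections).getD kv.1 "" = kv.2 := by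
    intro kv hkv
    exact PySem.Dict.getD_of_mem_items _ (by simpa using hkv)
      (by rw [PySem.Dict.keys_mk]; exact h) ""
  unfold pvUnknown
  rw [List.filter_map, List.filter_map, List.map_map, List.filter_filter]
  have hfil : List.filter
      (fun kv => ((fun k => decide ((PySem.Dict.mk sections).getD k "" ≠ "")) ∘ Prod.fst) kv
        && ((fun k => !pvSectionOrder.contains k) ∘ Prod.fst) kv) sections
      = List.filter (fun kv => !pvSectionOrder.contains kv.1 && decide (kv.2 ≠ "")) sections := by
    apply List.filter_congr
    intro kv hkv
    simp only [Function.comp]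
    rw [hval kv hkv, Bool.and_comm]
  rw [hfil]
  apply List.map_congr_left
  intro kv hkv
  simp only [Function.comp]
  rw [hval kv (List.mem_of_mem_filter hkv)]

lemma pv_main (sections : List (String × String)) (h : (sections.map Prod.fst).Nodup) :
    build_full_text_py sections = build_full_text_py_alt sections := by
  simp only [build_full_text_py, build_full_text_py_alt]
  rw [PySem.List.foldl_append_if
        (fun s => (PySem.Dict.mk sections).contains s
          && decide ((PySem.Dict.mk sections).getD s "" ≠ ""))
        (fun s => pvFmt s ((PySem.Dict.mk sections).getD s "")),
      PySem.List.foldl_append_if _ _ sections,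
      pv_sorted_char _ h, List.filter_append, List.map_append,
      pv_part1 sections, pv_part2 sections h]
  simp

-- ===== VERDICT (by name: the statement is the Claim_ definition above) =====
theorem build_full_text_py_spec : Claim_equal_build_full_text_py := by
  intro sections _ hpre
  exact pv_main sections hpre
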